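-- pv_equiv track=rewrite | github.com/ErickBrendal/kanboard | scripts/popular_metadata_excel.py | match_task
-- ===== SOURCE A (Python) =====
-- def normalize_title(title):
--     """Normaliza título para comparação fuzzy"""
--     if not title:
--         return ""
--     return str(title).strip().lower().replace("  ", " ")
--
-- def match_task(excel_title, tasks):
--     """Encontra a tarefa no Kanboard pelo título"""
--     excel_norm = normalize_title(excel_title)
--
--     # Match exato
--     for t in tasks:
--         if normalize_title(t.get("title", "")) == excel_norm:
--             return t
--
--     # Match parcial (título do Excel contido no título da tarefa ou vice-versa)
--     for t in tasks:
--         task_norm = normalize_title(t.get("title", ""))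
--         if excel_norm in task_norm or task_norm in excel_norm:
--             return t
--
--     # Match por Cherwell ID (se disponível no título da tarefa)
--     return None
-- ===== SOURCE B (Python) =====
-- def normalize_title(title):
--     """Normaliza título para comparação fuzzy"""
--     if not title:
--         return ""
--     return str(title).strip().lower().replace("  ", " ")
--
-- def match_task(excel_title, tasks):
--     """Single pass: return on first exact match; remember the first partial match as fallback"""
--     excel_norm = normalize_title(excel_title)
--     partial = None
--     for t in tasks:
--         task_norm = normalize_title(t.get("title", ""))
--         if task_norm == excel_norm:
--             return t
--         if partial is None and (excel_norm in task_norm or task_norm in excel_norm):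
--             partial = t
--     return partial
-- ===== Notes on version B (the rewrite author's own statement) =====
-- stated objective: alternative
-- what changed: Replaces A's two sequential scans (exact pass, then partial pass, each re-normalizing every title) with a single pass that normalizes each title once, returns immediately on an exact match, and defers the first partial match as a fallback.
import Mathlib
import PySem

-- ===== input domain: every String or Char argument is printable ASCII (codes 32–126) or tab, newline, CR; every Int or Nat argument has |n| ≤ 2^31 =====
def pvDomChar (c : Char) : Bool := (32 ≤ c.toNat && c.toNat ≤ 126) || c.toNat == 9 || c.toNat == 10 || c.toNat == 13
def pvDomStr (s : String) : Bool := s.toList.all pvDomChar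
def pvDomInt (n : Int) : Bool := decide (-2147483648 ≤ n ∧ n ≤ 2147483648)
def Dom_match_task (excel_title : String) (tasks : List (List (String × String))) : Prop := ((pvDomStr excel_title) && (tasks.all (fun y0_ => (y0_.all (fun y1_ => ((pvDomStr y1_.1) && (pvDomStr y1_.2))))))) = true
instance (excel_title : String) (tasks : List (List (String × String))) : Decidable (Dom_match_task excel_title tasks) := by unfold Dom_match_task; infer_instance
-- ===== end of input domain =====

-- B replaces A's two sequential scans with one pass that normalizes each title once,
-- returning on the first exact match and deferring the first partial match (objective: alternative decomposition).

-- normalize_title (shared Python helper, used by both A and B)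
def normalizeTitle (title : String) : String :=
  if title = "" then ""
  else PySem.Str.replace (PySem.Str.lower (PySem.Str.strip title)) "  " " "

-- t.get("title", "") on the association-list encoding of the dict (first match)
def getTitle (t : List (String × String)) : String :=
  (t.lookup "title").getD ""

-- excel_norm in task_norm or task_norm in excel_norm
def partialHit (en tn : String) : Bool :=
  PySem.Str.isIn en tn || PySem.Str.isIn tn en

-- ===== PORT A =====
-- first loop of A: exact match
def mtExact (en : String) : List (List (String × String)) → Option (List (String × String))
  | [] => none
  | t :: ts => if normalizeTitle (getTitle t) = en then some t else mtExact en ts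

-- second loop of A: partial match
def mtPartial (en : String) : List (List (String × String)) → Option (List (String × String))
  | [] => none
  | t :: ts =>
      let tn := normalizeTitle (getTitle t)
      if partialHit en tn then some t else mtPartial en ts

def match_task (excel_title : String) (tasks : List (List (String × String))) : Option (List (String × String)) :=
  let en := normalizeTitle excel_title
  match mtExact en tasks with
  | some t => some t
  | none => mtPartial en tasks

-- ===== PORT B =====
-- single pass with a deferred first-partial candidate
def mtScan (en : String) (partial_ : Option (List (String × String))) :
    List (List (String × String)) → Option (List (String × String))
  | [] => partial_
  | t :: ts =>
      let tn := normalizeTitle (getTitle t)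
      if tn = en then some t
      else if partial_.isNone && partialHit en tn then mtScan en (some t) ts
      else mtScan en partial_ ts

def match_task_alt (excel_title : String) (tasks : List (List (String × String))) : Option (List (String × String)) :=
  mtScan (normalizeTitle excel_title) none tasks

-- ===== PRECONDITION & SPEC =====
def Spec_match_task (excel_title : String) (tasks : List (List (String × String))) (out : Option (List (String × String))) : Prop := out = match_task_alt excel_title tasks
instance (excel_title : String) (tasks : List (List (String × String))) (out : Option (List (String × String))) : Decidable (Spec_match_task excel_title tasks out) := by unfold Spec_match_task; infer_instance

-- ===== CLAIM (what is proved, stated in full; the proofs are below) =====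
def Claim_equal_match_task : Prop := ∀ (excel_title : String) (tasks : List (List (String × String))), Dom_match_task excel_title tasks → Spec_match_task excel_title tasks (match_task excel_title tasks)

-- ===== LEMMAS AND PROOFS =====

-- B's single pass equals: exact result if any, else the stored candidate, else A's partial pass
theorem mtScan_eq (en : String) (ts : List (List (String × String)))
    (cand : Option (List (String × String))) :
    mtScan en cand ts =
      match mtExact en ts with
      | some t => some t
      | none => match cand with
                | some c => some c
                | none => mtPartial en ts := by
  induction ts generalizing cand with
  | nil => cases cand <;> simp [mtScan, mtExact, mtPartial]
  | cons t ts ih =>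
    simp only [mtScan, mtExact, mtPartial]
    by_cases he : normalizeTitle (getTitle t) = en
    · simp [he]
    · simp only [he, if_false]
      cases cand with
      | some c => simp [ih]
      | none =>
        by_cases hp : partialHit en (normalizeTitle (getTitle t))
        · simp [hp, ih]
        · simp [hp, ih]

-- ===== VERDICT (by name: the statement is the Claim_ definition above) =====
theorem match_task_spec : Claim_equal_match_task := by
  intro et ts _
  unfold Spec_match_task match_task match_task_alt
  rw [mtScan_eq]
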